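-- pv_equiv track=rewrite | github.com/svenwb/advent-of-code-2021 | src/day20.py | apply_algrithm
-- ===== SOURCE A (Python) =====
-- def apply_algrithm(algorithm, input):
--     output = []
--     for i in range(len(input)-3):
--         output_row = []
--         for j in range(len(input[0])-3):
--             pixel = input[i][j:j+3] + input[i+1][j:j+3] + input[i+2][j:j+3]
--             lookup = int("".join(str(x) for x in pixel), 2)
--             output_row.append(algorithm[lookup])
--         output.append(output_row)
--
--     return output
-- ===== SOURCE B (Python) =====
-- def apply_algrithm(algorithm, input):
--     # Two-phase: precompute per-row horizontal 3-bit triplet values, then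
--     # combine three vertically adjacent triplets per output pixel.
--     if len(input) < 4:
--         return []
--     w = len(input[0])
--     trip = []
--     for r in range(len(input) - 1):
--         row = input[r]
--         trip.append([4 * row[j] + 2 * row[j + 1] + row[j + 2] for j in range(w - 3)])
--     return [[algorithm[64 * trip[i][j] + 8 * trip[i + 1][j] + trip[i + 2][j]]
--              for j in range(w - 3)]
--             for i in range(len(input) - 3)]
-- ===== Notes on version B (the rewrite author's own statement) =====
-- stated objective: alternative
-- what changed: A rescans all nine pixels and re-parses a joined binary string per output cell; B first builds a table of horizontal 3-bit triplet values per row (each reused by three output rows) and then combines three vertically adjacent triplets arithmetically per cell, with no string round-trip.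
-- outside the precondition, e.g. on apply_algrithm([7], [[0, 0, 0, 0], [0, 0, 0, 0], [0, 0, 0, 0], [0, 0, 0, 0]]): A returns [[7]], B returns [[7]]
import Mathlib
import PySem

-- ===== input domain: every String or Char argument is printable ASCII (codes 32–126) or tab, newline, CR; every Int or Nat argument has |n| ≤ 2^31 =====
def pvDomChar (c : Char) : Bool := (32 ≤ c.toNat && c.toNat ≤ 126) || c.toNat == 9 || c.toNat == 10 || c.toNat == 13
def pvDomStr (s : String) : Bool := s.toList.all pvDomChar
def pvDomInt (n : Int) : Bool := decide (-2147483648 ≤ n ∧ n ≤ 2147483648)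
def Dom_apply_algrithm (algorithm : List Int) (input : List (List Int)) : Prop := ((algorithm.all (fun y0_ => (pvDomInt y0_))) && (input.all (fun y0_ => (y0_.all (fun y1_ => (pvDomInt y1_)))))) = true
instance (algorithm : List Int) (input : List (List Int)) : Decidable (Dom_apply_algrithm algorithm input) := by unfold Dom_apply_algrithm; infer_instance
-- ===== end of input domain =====

-- B re-decomposes A's per-pixel 3x3 rescan into two phases (horizontal triplet
-- table, then vertical combine); equivalence is about the return value (no mutation).

-- ===== PORT A =====
-- literal transliteration of A: per-pixel slice + string-join + int(.,2) parse.
-- "".join(str(x) for x in pixel) is ported on the List Char side as flatMap toChars;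
-- int(s, 2) is PySem.Int.ofCharsBase? (exact); total via .getD 0 on inputs Pre_ excludes.
def apply_algrithm (algorithm : List Int) (input : List (List Int)) : List (List Int) :=
  (List.range (input.length - 3)).foldl (fun output i =>
    output ++ [((List.range ((input.getD 0 []).length - 3)).foldl (fun output_row j =>
      let pixel := PySem.List.slice (input.getD i []) (some (j:Int)) (some ((j:Int)+3))
               ++ PySem.List.slice (input.getD (i+1) []) (some (j:Int)) (some ((j:Int)+3))
               ++ PySem.List.slice (input.getD (i+2) []) (some (j:Int)) (some ((j:Int)+3))
      let lookup := (PySem.Int.ofCharsBase? (pixel.flatMap PySem.Int.toChars) 2).getD 0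
      output_row ++ [(PySem.List.pyGet? algorithm lookup).getD 0]) [])]) []

-- ===== PORT B =====
-- literal transliteration of Source B: triplet table trip, then vertical combine.
def apply_algrithm_alt (algorithm : List Int) (input : List (List Int)) : List (List Int) :=
  if input.length < 4 then [] else
  let w := (input.getD 0 []).length
  let trip := (List.range (input.length - 1)).map (fun r =>
    let row := input.getD r []
    (List.range (w - 3)).map (fun j => 4 * row.getD j 0 + 2 * row.getD (j+1) 0 + row.getD (j+2) 0))
  (List.range (input.length - 3)).map (fun i =>
    (List.range (w - 3)).map (fun j =>
      (PySem.List.pyGet? algorithm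
        (64 * (trip.getD i []).getD j 0 + 8 * (trip.getD (i+1) []).getD j 0 + (trip.getD (i+2) []).getD j 0)).getD 0))

-- ===== PRECONDITION & SPEC =====
-- Pre_ excludes, when both loops actually run (≥4 rows and first row of width ≥ 4):
-- grids whose accessed entries are not 0/1 bits and grids whose accessed rows are
-- shorter than width-1 (A's str-join/slice then parses accidental binary of the
-- wrong digits or length), and algorithms shorter than 512 (some grids make A's
-- 9-bit lookup raise IndexError).
def Pre_apply_algrithm (algorithm : List Int) (input : List (List Int)) : Prop :=
  4 ≤ input.length → 4 ≤ (input.getD 0 []).length →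
    (512 ≤ algorithm.length ∧
     ∀ i < input.length - 1,
       (input.getD 0 []).length - 1 ≤ (input.getD i []).length ∧
       ∀ j < (input.getD 0 []).length - 1,
         (input.getD i []).getD j 0 = 0 ∨ (input.getD i []).getD j 0 = 1)
instance (algorithm : List Int) (input : List (List Int)) : Decidable (Pre_apply_algrithm algorithm input) := by unfold Pre_apply_algrithm; infer_instance

-- small witness (decide-friendly): three rows, so both loops are empty and Pre_'s
-- guarded conjunction is vacuous
def pvWitness_apply_algrithm : List Int × List (List Int) :=
  ([1, 0], [[0,1,0,0],[1,0,0,1],[0,0,1,0]])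

def Spec_apply_algrithm (algorithm : List Int) (input : List (List Int)) (out : List (List Int)) : Prop := out = apply_algrithm_alt algorithm input
instance (algorithm : List Int) (input : List (List Int)) (out : List (List Int)) : Decidable (Spec_apply_algrithm algorithm input out) := by unfold Spec_apply_algrithm; infer_instance

-- ===== CLAIM (what is proved, stated in full; the proofs are below) =====
def Claim_equal_apply_algrithm : Prop := ∀ (algorithm : List Int) (input : List (List Int)), Dom_apply_algrithm algorithm input → Pre_apply_algrithm algorithm input → Spec_apply_algrithm algorithm input (apply_algrithm algorithm input)

-- ===== LEMMAS AND PROOFS =====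

-- a 3-slice at an in-range position is the explicit 3-element list
lemma slice3 (xs : List Int) (j : Nat) (h : j + 3 ≤ xs.length) :
    PySem.List.slice xs (some (j:Int)) (some ((j:Int)+3)) =
      [xs.getD j 0, xs.getD (j+1) 0, xs.getD (j+2) 0] := by
  have e : ((j:Int)+3) = ((j:Int) + ((3:Nat):Int)) := by push_cast; ring
  rw [e, PySem.List.slice_natCast_add]
  apply List.ext_getElem
  · simp; omega
  · intro k h1 h2
    simp at h2
    interval_cases k <;>
      simp [List.getElem_take, List.getElem_drop, List.getD_eq_getElem?_getD,
        List.getElem?_eq_getElem (by omega : j < xs.length),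
        List.getElem?_eq_getElem (by omega : j+1 < xs.length),
        List.getElem?_eq_getElem (by omega : j+2 < xs.length)]

-- A's join-then-parse-base-2 of nine 0/1 bits equals B's triplet arithmetic
lemma cellval (b0 b1 b2 b3 b4 b5 b6 b7 b8 : Int)
    (h0 : b0 = 0 ∨ b0 = 1) (h1 : b1 = 0 ∨ b1 = 1) (h2 : b2 = 0 ∨ b2 = 1)
    (h3 : b3 = 0 ∨ b3 = 1) (h4 : b4 = 0 ∨ b4 = 1) (h5 : b5 = 0 ∨ b5 = 1)
    (h6 : b6 = 0 ∨ b6 = 1) (h7 : b7 = 0 ∨ b7 = 1) (h8 : b8 = 0 ∨ b8 = 1) :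
    (PySem.Int.ofCharsBase?
        (([b0,b1,b2,b3,b4,b5,b6,b7,b8] : List Int).flatMap PySem.Int.toChars) 2).getD 0
      = 64 * (4*b0 + 2*b1 + b2) + 8 * (4*b3 + 2*b4 + b5) + (4*b6 + 2*b7 + b8) := by
  rcases h0 with rfl|rfl <;> rcases h1 with rfl|rfl <;> rcases h2 with rfl|rfl <;>
    rcases h3 with rfl|rfl <;> rcases h4 with rfl|rfl <;> rcases h5 with rfl|rfl <;>
    rcases h6 with rfl|rfl <;> rcases h7 with rfl|rfl <;> rcases h8 with rfl|rfl <;> decide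

-- ===== VERDICT (by name: the statement is the Claim_ definition above) =====
theorem apply_algrithm_spec : Claim_equal_apply_algrithm := by
  intro algorithm input _hdom hpre
  unfold Spec_apply_algrithm apply_algrithm apply_algrithm_alt
  by_cases hn : input.length < 4
  · have h3 : input.length - 3 = 0 := by omega
    simp [h3, hn]
  · simp only [if_neg hn]
    rw [PySem.List.foldl_append_singleton_eq_map, List.nil_append]
    apply List.map_congr_left
    intro i hi
    rw [List.mem_range] at hi
    rw [PySem.List.foldl_append_singleton_eq_map, List.nil_append]
    rw [show (do let a ← List.range ((input.getD 0 []).length - 3); pure ((a:Int)))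
          = List.map (fun a : Nat => (a:Int)) (List.range ((input.getD 0 []).length - 3)) from
        (List.map_eq_flatMap).symm, List.map_map]
    apply List.map_congr_left
    intro j hj
    rw [List.mem_range] at hj
    simp only [Function.comp_apply]
    -- here both loops ran: 4 ≤ rows, 4 ≤ width
    have hw : 4 ≤ (input.getD 0 []).length := by omega
    obtain ⟨_halg, hrows⟩ := hpre (by omega) hw
    obtain ⟨hl0, hb0⟩ := hrows i (by omega)
    obtain ⟨hl1, hb1⟩ := hrows (i+1) (by omega)
    obtain ⟨hl2, hb2⟩ := hrows (i+2) (by omega)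
    rw [PySem.List.getD_map_range _ _ _ _ (by omega : i < input.length - 1),
        PySem.List.getD_map_range _ _ _ _ (by omega : i+1 < input.length - 1),
        PySem.List.getD_map_range _ _ _ _ (by omega : i+2 < input.length - 1)]
    simp only [PySem.List.getD_map_range _ _ _ _ (by omega : j < (input.getD 0 []).length - 3)]
    rw [slice3 _ _ (by omega), slice3 _ _ (by omega), slice3 _ _ (by omega)]
    simp only [List.cons_append, List.nil_append]
    rw [cellval _ _ _ _ _ _ _ _ _
      (hb0 j (by omega)) (hb0 (j+1) (by omega)) (hb0 (j+2) (by omega))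
      (hb1 j (by omega)) (hb1 (j+1) (by omega)) (hb1 (j+2) (by omega))
      (hb2 j (by omega)) (hb2 (j+1) (by omega)) (hb2 (j+2) (by omega))]
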